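-- pv_equiv track=rewrite | github.com/ChristophBarth/41.-BWInf-Runde-2 | Aufgabe 2 - Implementierung/utils.py | concatenate_lists
-- ===== SOURCE A (Python) =====
-- def concatenate_lists(list):
--     list1, list2, list3 = list[0], list[1], list[2]
--     out = []
--     for i in range(max(len(list1), len(list2), len(list3))):
--         if i < len(list1):
--             out.append(list1[i])
--         if i < len(list2):
--             out.append(list2[i])
--         if i < len(list3):
--             out.append(list3[i])
--     return out
-- ===== SOURCE B (Python) =====
-- def concatenate_lists(list):
--     # Consume the three lists from the front (kept reversed so pop() is O(1)),
--     # instead of A's index loop over range(max(len,...)).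
--     a, b, c = list[0][::-1], list[1][::-1], list[2][::-1]
--     out = []
--     while a or b or c:
--         if a:
--             out.append(a.pop())
--         if b:
--             out.append(b.pop())
--         if c:
--             out.append(c.pop())
--     return out
-- ===== Notes on version B (the rewrite author's own statement) =====
-- stated objective: alternative
-- what changed: B replaces A's index loop over range(max(len,len,len)) with a queue-style while loop that consumes the three lists from the front (kept reversed so pop() is O(1)), eliminating the max() computation and all index/bounds arithmetic.
import Mathlib
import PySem

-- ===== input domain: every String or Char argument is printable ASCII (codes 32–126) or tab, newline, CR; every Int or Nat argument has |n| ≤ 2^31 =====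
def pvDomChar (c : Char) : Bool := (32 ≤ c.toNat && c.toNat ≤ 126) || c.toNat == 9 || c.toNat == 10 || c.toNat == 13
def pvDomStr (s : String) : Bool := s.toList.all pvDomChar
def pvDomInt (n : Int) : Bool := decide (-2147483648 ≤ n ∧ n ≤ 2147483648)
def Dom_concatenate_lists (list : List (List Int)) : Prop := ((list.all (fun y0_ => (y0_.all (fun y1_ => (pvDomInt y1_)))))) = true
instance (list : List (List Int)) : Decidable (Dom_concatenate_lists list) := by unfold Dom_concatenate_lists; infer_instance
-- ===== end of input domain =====

-- B interleaves the first three lists by consuming them from the front (kept reversed, pop from the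
-- end) instead of A's index loop over range(max of the three lengths); equal return values on Pre_.

-- ===== PORT A =====
-- max(len(list1), len(list2), len(list3))
def pvMaxLen (a b c : List Int) : Nat := max a.length (max b.length c.length)

-- one conditional append 'if i < len(l): out.append(l[i])' (the guard makes the index in range, so pyGetD is exact)
def pvAppIf (l : List Int) (i : Int) (o : List Int) : List Int :=
  if i < (l.length : Int) then o ++ [PySem.List.pyGetD l i 0] else o

-- A's loop body for index i: the three guarded appends in order
def pvStepA (l1 l2 l3 : List Int) (out : List Int) (i : Int) : List Int :=
  pvAppIf l3 i (pvAppIf l2 i (pvAppIf l1 i out))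

def concatenate_lists (list : List (List Int)) : List Int :=
  match PySem.List.pyGet? list 0, PySem.List.pyGet? list 1, PySem.List.pyGet? list 2 with
  | some l1, some l2, some l3 =>
      (PySem.List.pyRange 0 (pvMaxLen l1 l2 l3 : Int) 1).foldl (pvStepA l1 l2 l3) []
  | _, _, _ => []   -- Python raises IndexError here; excluded by Pre_

-- ===== PORT B =====
-- B's while loop: a, b, c are the reversed working lists ([::-1] is reverse, PySem.List.slice?_none_none_neg_one);
-- 'if a: out.append(a.pop())' appends the last element and drops it (dropLast [] = [] makes the
-- unconditional dropLast the same no-op as the guarded pop).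
def pvAltLoop (out a b c : List Int) : List Int :=
  if a = [] ∧ b = [] ∧ c = [] then out
  else
    pvAltLoop
      (out ++ (if a.isEmpty then [] else [a.getLast!])
           ++ (if b.isEmpty then [] else [b.getLast!])
           ++ (if c.isEmpty then [] else [c.getLast!]))
      a.dropLast b.dropLast c.dropLast
termination_by a.length + b.length + c.length
decreasing_by
  simp only [List.length_dropLast]
  rcases a with _ | ⟨x, a⟩ <;> rcases b with _ | ⟨y, b⟩ <;> rcases c with _ | ⟨z, c⟩ <;>
    simp_all <;> omega

def concatenate_lists_alt (list : List (List Int)) : List Int :=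
  match PySem.List.pyGet? list 0 with
  | none => []   -- Python raises IndexError here; excluded by Pre_
  | some l1 =>
    match PySem.List.pyGet? list 1 with
    | none => []
    | some l2 =>
      match PySem.List.pyGet? list 2 with
      | none => []
      | some l3 => pvAltLoop [] l1.reverse l2.reverse l3.reverse

-- ===== PRECONDITION & SPEC =====
-- A (and B) raise IndexError on list[2] when fewer than three lists are given.
def Pre_concatenate_lists (list : List (List Int)) : Prop := 3 ≤ list.length
instance (list : List (List Int)) : Decidable (Pre_concatenate_lists list) := by
  unfold Pre_concatenate_lists; infer_instance
def pvWitness_concatenate_lists : List (List Int) := [[1], [2, 3], [4]]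

def Spec_concatenate_lists (list : List (List Int)) (out : List Int) : Prop := out = concatenate_lists_alt list
instance (list : List (List Int)) (out : List Int) : Decidable (Spec_concatenate_lists list out) := by unfold Spec_concatenate_lists; infer_instance

-- ===== CLAIM (what is proved, stated in full; the proofs are below) =====
def Claim_equal_concatenate_lists : Prop := ∀ (list : List (List Int)), Dom_concatenate_lists list → Pre_concatenate_lists list → Spec_concatenate_lists list (concatenate_lists list)

-- ===== LEMMAS AND PROOFS =====

-- shifting the loop index by one turns a guarded append on l into one on l.tail
lemma pvAppIf_shift (l o : List Int) (k : Nat) :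
    pvAppIf l (1 + (k : Int)) o = pvAppIf l.tail (k : Int) o := by
  rcases l with _ | ⟨x, t⟩
  · simp only [pvAppIf, List.length_nil, List.tail_nil, Nat.cast_zero]
    rw [if_neg (by omega), if_neg (by omega)]
  · have h1 : (1 + (k : Int)) = ((k + 1 : Nat) : Int) := by push_cast; ring
    simp only [pvAppIf, h1, PySem.List.pyGetD_natCast, List.tail_cons, List.length_cons]
    rcases lt_or_ge k t.length with h | h
    · rw [if_pos (by exact_mod_cast Nat.succ_lt_succ h), if_pos (by exact_mod_cast h)]
      simp
    · rw [if_neg (by exact_mod_cast not_lt.mpr (Nat.succ_le_succ h)),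
         if_neg (by exact_mod_cast not_lt.mpr h)]

lemma pvStepA_shift (l1 l2 l3 o : List Int) (k : Nat) :
    pvStepA l1 l2 l3 o (1 + (k : Int)) = pvStepA l1.tail l2.tail l3.tail o (k : Int) := by
  simp [pvStepA, pvAppIf_shift]

-- the head step: index 0 of A's loop appends exactly the heads of the nonempty lists
lemma pvAppIf_zero (l o : List Int) :
    pvAppIf l 0 o = o ++ (if l.isEmpty then [] else [l.head!]) := by
  rcases l with _ | ⟨x, t⟩
  · simp only [pvAppIf, List.length_nil, Nat.cast_zero, List.isEmpty_nil]
    rw [if_neg (by omega)]; simp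
  · simp only [pvAppIf, List.length_cons, List.isEmpty_cons]
    rw [if_pos (by push_cast; omega)]
    simp [PySem.List.pyGetD_zero]

-- main loop equivalence, by induction on the total remaining length
lemma pvMain : ∀ n a b c out, a.length + b.length + c.length ≤ n →
    (PySem.List.pyRange 0 (pvMaxLen a b c : Int) 1).foldl (pvStepA a b c) out
      = pvAltLoop out a.reverse b.reverse c.reverse := by
  intro n
  induction n with
  | zero =>
    intro a b c out h
    have ha : a = [] := by cases a <;> simp_all
    have hb : b = [] := by cases b <;> simp_all
    have hc : c = [] := by cases c <;> simp_all
    subst ha; subst hb; subst hc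
    rw [pvAltLoop]
    simp [pvMaxLen, PySem.List.pyRange_one_eq_nil]
  | succ n ih =>
    intro a b c out h
    by_cases hall : a = [] ∧ b = [] ∧ c = []
    · obtain ⟨ha, hb, hc⟩ := hall; subst ha; subst hb; subst hc
      rw [pvAltLoop]
      simp [pvMaxLen, PySem.List.pyRange_one_eq_nil]
    · have hne : a ≠ [] ∨ b ≠ [] ∨ c ≠ [] := by tauto
      have hNpos : 1 ≤ pvMaxLen a b c := by
        rcases hne with h' | h' | h' <;> have := List.length_pos_iff.mpr h' <;>
          simp only [pvMaxLen] <;> omega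
      have hcons : PySem.List.pyRange 0 (pvMaxLen a b c : Int) 1
          = 0 :: PySem.List.pyRange 1 (pvMaxLen a b c : Int) 1 :=
        PySem.List.pyRange_one_cons (by exact_mod_cast hNpos)
      rw [hcons]
      simp only [List.foldl_cons]
      have hstep0 : pvStepA a b c out 0
          = out ++ (if a.isEmpty then [] else [a.head!])
                ++ (if b.isEmpty then [] else [b.head!])
                ++ (if c.isEmpty then [] else [c.head!]) := by
        simp [pvStepA, pvAppIf_zero, List.append_assoc]
      have hshift : ∀ out', (PySem.List.pyRange 1 (pvMaxLen a b c : Int) 1).foldl (pvStepA a b c) out'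
          = (PySem.List.pyRange 0 (pvMaxLen a.tail b.tail c.tail : Int) 1).foldl
              (pvStepA a.tail b.tail c.tail) out' := by
        intro out'
        have hM : pvMaxLen a.tail b.tail c.tail = pvMaxLen a b c - 1 := by
          simp only [pvMaxLen, List.length_tail]
          omega
        rw [hM, PySem.List.pyRange_one, PySem.List.pyRange_one]
        have hlen : (((pvMaxLen a b c : Nat) : Int) - 1).toNat
            = ((((pvMaxLen a b c - 1 : Nat) : Nat) : Int) - 0).toNat := by omega
        rw [hlen, List.foldl_map, List.foldl_map]
        apply PySem.List.foldl_congr_mem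
        intro acc k _
        show pvStepA a b c acc (1 + (k : Int)) = pvStepA a.tail b.tail c.tail acc (0 + (k : Int))
        rw [pvStepA_shift]
        norm_num
      rw [hstep0, hshift]
      have hrec : a.tail.length + b.tail.length + c.tail.length ≤ n := by
        have := List.length_tail (l := a)
        rcases hne with h' | h' | h' <;> have := List.length_pos_iff.mpr h' <;>
          simp only [List.length_tail] <;> omega
      rw [ih a.tail b.tail c.tail _ hrec]
      conv_rhs => rw [pvAltLoop]
      have hneg : ¬ (a.reverse = [] ∧ b.reverse = [] ∧ c.reverse = []) := by
        simpa using hall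
      rw [if_neg hneg]
      congr 1
      · rcases a with _ | ⟨x, t⟩ <;> rcases b with _ | ⟨y, u⟩ <;> rcases c with _ | ⟨z, v⟩ <;>
          simp [List.append_assoc]
      all_goals
        simp

-- ===== VERDICT (by name: the statement is the Claim_ definition above) =====
theorem concatenate_lists_spec : Claim_equal_concatenate_lists := by
  intro list _ hpre
  unfold Pre_concatenate_lists at hpre
  rcases list with _ | ⟨l1, list⟩; · simp at hpre
  rcases list with _ | ⟨l2, list⟩; · simp at hpre
  rcases list with _ | ⟨l3, list⟩; · simp at hpre
  unfold Spec_concatenate_lists concatenate_lists concatenate_lists_alt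
  have hc0 : (0 : Int) ≤ (list.length : Int) + 1 + 1 := by omega
  have hc1 : (0 : Int) ≤ (list.length : Int) + 1 := by omega
  have hc2 : (2 : Int) ≤ (list.length : Int) + 1 + 1 := by omega
  have h0 : PySem.List.pyGet? (l1 :: l2 :: l3 :: list) 0 = some l1 := by
    simp [PySem.List.pyGet?, PySem.List.pyIdx?, hc0]
  have h1 : PySem.List.pyGet? (l1 :: l2 :: l3 :: list) 1 = some l2 := by
    simp [PySem.List.pyGet?, PySem.List.pyIdx?, hc1]
  have h2 : PySem.List.pyGet? (l1 :: l2 :: l3 :: list) 2 = some l3 := by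
    simp [PySem.List.pyGet?, PySem.List.pyIdx?, hc2]
  rw [h0, h1, h2]
  exact pvMain (l1.length + l2.length + l3.length) l1 l2 l3 [] le_rfl
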